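-- pv_equiv track=rewrite | github.com/jeanmerlet/stm_mouse_skin_ikkb | irf-mcl/find_composite_mcl_clusters.py | get_best_n_composite_cluster_sizes
-- ===== SOURCE A (Python) =====
-- def get_best_n_composite_cluster_sizes(matching_clusters, n):
--   best_n_composite_clusters = {}
--   for i in range(n):
--     cluster, num_matches = list(matching_clusters.keys()), list(matching_clusters.values())
--     best_cluster = cluster[num_matches.index(max(num_matches))]
--     best_max = matching_clusters[best_cluster]
--     best_n_composite_clusters[best_cluster] = best_max
--     matching_clusters.pop(best_cluster)
--     if len(matching_clusters) == 0:
--       break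
--   return(best_n_composite_clusters)
-- ===== SOURCE B (Python) =====
-- def get_best_n_composite_cluster_sizes(matching_clusters, n):
--   ordered = sorted(matching_clusters.items(), key=lambda kv: kv[1], reverse=True)
--   best_n_composite_clusters = {}
--   for cluster, num_matches in ordered[:max(n, 0)]:
--     best_n_composite_clusters[cluster] = num_matches
--     matching_clusters.pop(cluster)
--   return best_n_composite_clusters
-- ===== Notes on version B (the rewrite author's own statement) =====
-- stated objective: faster
-- what changed: A rescans the whole dict for its maximum once per selected entry; B sorts the items once by value descending (stable, so ties keep insertion order exactly like A's first-max .index scan) and takes the first max(n,0) entries in a single pass, popping the same keys from the argument dict.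
import Mathlib
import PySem

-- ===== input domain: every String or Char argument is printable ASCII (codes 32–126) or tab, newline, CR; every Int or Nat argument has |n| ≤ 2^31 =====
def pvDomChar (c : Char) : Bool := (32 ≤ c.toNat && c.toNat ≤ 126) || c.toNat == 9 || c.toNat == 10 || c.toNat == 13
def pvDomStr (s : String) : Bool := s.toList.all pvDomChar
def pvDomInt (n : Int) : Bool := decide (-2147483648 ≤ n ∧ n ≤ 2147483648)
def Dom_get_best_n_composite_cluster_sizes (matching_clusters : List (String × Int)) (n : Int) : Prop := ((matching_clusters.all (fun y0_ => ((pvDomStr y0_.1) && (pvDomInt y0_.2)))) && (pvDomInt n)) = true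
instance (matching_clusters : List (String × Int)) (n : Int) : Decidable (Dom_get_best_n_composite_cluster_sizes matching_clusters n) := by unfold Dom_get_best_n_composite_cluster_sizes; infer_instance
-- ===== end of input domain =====

-- B replaces A's n repeated max-scans over the dict with one stable descending sort plus a
-- single pass over its first max(n,0) entries. Both A and B pop the selected keys from the
-- argument dict (same side effect); the theorems below are about the RETURN value only.

-- ===== PORT A =====
-- A's 'for i in range(n)' loop: one step per fuel unit; the `none` branches are where
-- Python raises (max of an empty dict) or are unreachable under Pre_.
def pvALoop : Nat → PySem.Dict String Int → PySem.Dict String Int → PySem.Dict String Int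
  | 0, _, acc => acc
  | k + 1, d, acc =>
    let cluster := d.keys
    let num_matches := d.values
    match PySem.List.max? num_matches (fun v => v) with
    | none => acc  -- Python: max([]) raises ValueError (outside Pre_)
    | some mx =>
      match PySem.List.index? num_matches mx with
      | none => acc  -- unreachable: mx ∈ num_matches
      | some i =>
        match PySem.List.pyGet? cluster (i : Int) with
        | none => acc  -- unreachable: i < len(cluster)
        | some best_cluster =>
          match d.get? best_cluster with
          | none => acc  -- unreachable: best_cluster ∈ keys
          | some best_max =>
            let acc' := acc.insert best_cluster best_max
            let d' := d.erase best_cluster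
            if d'.size = 0 then acc' else pvALoop k d' acc'

def get_best_n_composite_cluster_sizes (matching_clusters : List (String × Int)) (n : Int) : List (String × Int) :=
  (pvALoop n.toNat (PySem.Dict.mk matching_clusters) PySem.Dict.empty).items

-- ===== PORT B =====
def get_best_n_composite_cluster_sizes_alt (matching_clusters : List (String × Int)) (n : Int) : List (String × Int) :=
  let ordered := PySem.List.sorted matching_clusters (fun kv => kv.2) true
  let chosen := PySem.List.slice ordered none (some (max n 0))
  (chosen.foldl (fun d kv => d.insert kv.1 kv.2) PySem.Dict.empty).items

-- ===== PRECONDITION & SPEC =====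
-- Pre_ excludes (a) the empty dict with n ≥ 1, where A raises ValueError (max of an empty
-- sequence), and (b) association lists with duplicate keys, which no Python dict argument
-- can represent.
def Pre_get_best_n_composite_cluster_sizes (matching_clusters : List (String × Int)) (n : Int) : Prop :=
  (matching_clusters ≠ [] ∨ n ≤ 0) ∧ (matching_clusters.map Prod.fst).Nodup
instance (matching_clusters : List (String × Int)) (n : Int) : Decidable (Pre_get_best_n_composite_cluster_sizes matching_clusters n) := by unfold Pre_get_best_n_composite_cluster_sizes; infer_instance
def pvWitness_get_best_n_composite_cluster_sizes : (List (String × Int)) × Int := ([("a", 3), ("b", 5), ("c", 5)], 2)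

def Spec_get_best_n_composite_cluster_sizes (matching_clusters : List (String × Int)) (n : Int) (out : List (String × Int)) : Prop := out = get_best_n_composite_cluster_sizes_alt matching_clusters n
instance (matching_clusters : List (String × Int)) (n : Int) (out : List (String × Int)) : Decidable (Spec_get_best_n_composite_cluster_sizes matching_clusters n out) := by unfold Spec_get_best_n_composite_cluster_sizes; infer_instance

-- ===== CLAIM (what is proved, stated in full; the proofs are below) =====
def Claim_equal_get_best_n_composite_cluster_sizes : Prop := ∀ (matching_clusters : List (String × Int)) (n : Int), Dom_get_best_n_composite_cluster_sizes matching_clusters n → Pre_get_best_n_composite_cluster_sizes matching_clusters n → Spec_get_best_n_composite_cluster_sizes matching_clusters n (get_best_n_composite_cluster_sizes matching_clusters n)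
-- ===== LEMMAS AND PROOFS =====

-- The insertion step and the insertion sort underlying B's sorted(…, key=snd, reverse=True).
def pvIns (x : String × Int) (ys : List (String × Int)) : List (String × Int) :=
  PySem.List.insertBy (fun a b => decide (b.2 < a.2)) x ys

def pvI (l : List (String × Int)) : List (String × Int) :=
  l.foldl (fun acc x => pvIns x acc) []

lemma pvI_append (l : List (String × Int)) (x : String × Int) :
    pvI (l ++ [x]) = pvIns x (pvI l) := by
  simp [pvI, List.foldl_append]

lemma sorted_eq_pvI (l : List (String × Int)) :
    PySem.List.sorted l (fun kv => kv.2) true = pvI l :=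
  PySem.List.sorted_rev_eq_foldl_insertBy l _

lemma pvIns_front (x : String × Int) (ys : List (String × Int))
    (h : ∀ y ∈ ys, y.2 < x.2) : pvIns x ys = x :: ys := by
  cases ys with
  | nil => rfl
  | cons y t =>
    have : y.2 < x.2 := h y (by simp)
    simp [pvIns, PySem.List.insertBy, this]

lemma pvIns_cons_of_le (x y : String × Int) (t : List (String × Int)) (h : x.2 ≤ y.2) :
    pvIns x (y :: t) = y :: pvIns x t := by
  have : ¬ (y.2 < x.2) := by omega
  simp [pvIns, PySem.List.insertBy, this]

lemma mem_pvI (x : String × Int) (l : List (String × Int)) (h : x ∈ pvI l) : x ∈ l := by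
  have := (PySem.List.sorted_perm l (fun kv : String × Int => kv.2) true).mem_iff (a := x)
  rw [PySem.List.sorted_rev_eq_foldl_insertBy] at this
  exact this.mp h

-- Selection step: the stable descending sort starts with the FIRST maximum of l, followed
-- by the stable descending sort of l with that element removed — exactly A's pick.
lemma pvI_selection (l : List (String × Int)) (hne : l ≠ []) :
    ∃ i, ∃ h : i < l.length,
      (∀ j (hj : j < l.length), (l[j]).2 ≤ (l[i]).2) ∧
      (∀ j (hj : j < i), (l[j]).2 < (l[i]'h).2) ∧
      pvI l = l[i] :: pvI (l.eraseIdx i) := by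
  induction l using List.reverseRecOn with
  | nil => exact absurd rfl hne
  | append_singleton l x ih =>
    rcases eq_or_ne l [] with rfl | hl
    · exact ⟨0, by simp, by simp, by simp, by simp [pvI, pvIns, PySem.List.insertBy]⟩
    · obtain ⟨i, h, hmax, hstrict, heq⟩ := ih hl
      by_cases hlt : (l[i]).2 < x.2
      · refine ⟨l.length, by simp, ?_, ?_, ?_⟩
        · intro j hj
          simp at hj
          rcases Nat.lt_or_ge j l.length with hj' | hj'
          · rw [List.getElem_append_left hj', List.getElem_append_right (by omega)]
            have := hmax j hj'
            simp
            omega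
          · have : j = l.length := by omega
            subst this
            simp
        · intro j hj
          rw [List.getElem_append_left hj, List.getElem_append_right (by omega)]
          have := hmax j hj
          simp
          omega
        · rw [pvI_append, heq]
          have : (l ++ [x]).eraseIdx l.length = l := by simp [List.eraseIdx_append]
          rw [this, pvIns_front]
          · rw [List.getElem_append_right (by omega)]
            simp [heq]
          · intro y hy
            have : y ∈ l := mem_pvI y l (by rw [heq]; exact hy)
            obtain ⟨j, hj, rfl⟩ := List.mem_iff_getElem.mp this
            exact lt_of_le_of_lt (hmax j hj) hlt
      · have hle : x.2 ≤ (l[i]).2 := by omega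
        refine ⟨i, by simp; omega, ?_, ?_, ?_⟩
        · intro j hj
          simp at hj
          rw [List.getElem_append_left h]
          rcases Nat.lt_or_ge j l.length with hj' | hj'
          · rw [List.getElem_append_left hj']
            exact hmax j hj'
          · have : j = l.length := by omega
            subst this
            rw [List.getElem_append_right (by omega)]
            simpa using hle
        · intro j hj
          rw [List.getElem_append_left h, List.getElem_append_left (by omega)]
          exact hstrict j hj
        · rw [pvI_append, heq, List.getElem_append_left h]
          have he : (l ++ [x]).eraseIdx i = l.eraseIdx i ++ [x] := by
            simp [List.eraseIdx_append, h]
          rw [he, pvI_append, pvIns_cons_of_le _ _ _ hle]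

-- dict.pop on a duplicate-free association list removes exactly the entry at index i.
lemma filter_ne_eq_eraseIdx (l : List (String × Int)) (i : Nat) (h : i < l.length)
    (hnd : (l.map Prod.fst).Nodup) :
    l.filter (fun p => !(p.1 == (l[i]).1)) = l.eraseIdx i := by
  induction l generalizing i with
  | nil => simp at h
  | cons a t ih =>
    rw [List.map_cons, List.nodup_cons] at hnd
    obtain ⟨hna, hnt⟩ := hnd
    cases i with
    | zero =>
      simp only [List.getElem_cons_zero, List.eraseIdx_cons_zero]
      rw [List.filter_cons]
      simp only [beq_self_eq_true, Bool.not_true]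
      apply List.filter_eq_self.mpr
      intro p hp
      have hne : p.1 ≠ a.1 := fun he => hna (he ▸ List.mem_map.mpr ⟨p, hp, rfl⟩)
      simp [hne]
    | succ j =>
      have hj : j < t.length := by simpa using h
      simp only [List.getElem_cons_succ, List.eraseIdx_cons_succ]
      rw [List.filter_cons]
      have hne : a.1 ≠ (t[j]).1 :=
        fun he => hna (he ▸ List.mem_map.mpr ⟨t[j], List.getElem_mem hj, rfl⟩)
      have : (!(a.1 == (t[j]).1)) = true := by simp [hne]
      rw [if_pos this, ih j hj hnt]

lemma not_mem_eraseIdx_self (m : List String) (i : Nat) (h : i < m.length) (hnd : m.Nodup) :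
    m[i] ∉ m.eraseIdx i := by
  intro hmem
  rw [List.eraseIdx_eq_take_drop_succ] at hmem
  rcases List.mem_append.mp hmem with hmem | hmem
  · obtain ⟨j, hj, hje⟩ := List.mem_iff_getElem.mp hmem
    rw [List.getElem_take] at hje
    have hj' : j < i := by simp at hj; omega
    have : j = i := hnd.getElem_inj_iff.mp hje
    omega
  · obtain ⟨j, hj, hje⟩ := List.mem_iff_getElem.mp hmem
    rw [List.getElem_drop] at hje
    have : i + 1 + j = i := hnd.getElem_inj_iff.mp hje
    omega

-- A's loop invariant: the result is the accumulator followed by the first k entries of the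
-- stable descending sort of the remaining dict.
lemma pvALoop_items (k : Nat) (d acc : PySem.Dict String Int)
    (hnd : d.keys.Nodup) (hdisj : ∀ c ∈ d.keys, acc.contains c = false)
    (hne : d.items ≠ [] ∨ k = 0) :
    (pvALoop k d acc).items = acc.items ++ (pvI d.items).take k := by
  induction k generalizing d acc with
  | zero => simp [pvALoop]
  | succ k ih =>
    have hl : d.items ≠ [] := by
      rcases hne with h | h
      · exact h
      · omega
    set l := d.items with hldef
    have hvals : d.values = l.map Prod.snd := rfl
    have hkeys : d.keys = l.map Prod.fst := rfl
    obtain ⟨mx, hmx⟩ : ∃ mx, PySem.List.max? (l.map Prod.snd) (fun v => v) = some mx := by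
      cases hmax : PySem.List.max? (l.map Prod.snd) (fun v => v) with
      | none => exact absurd (by simpa using (PySem.List.max?_eq_none_iff _ _).mp hmax) hl
      | some m => exact ⟨m, rfl⟩
    have hmx_mem : mx ∈ l.map Prod.snd := PySem.List.max?_mem hmx
    obtain ⟨i0, hi0⟩ : ∃ i0, PySem.List.index? (l.map Prod.snd) mx = some i0 := by
      cases hidx : PySem.List.index? (l.map Prod.snd) mx with
      | none => exact absurd ((PySem.List.index?_eq_none_iff _ _).mp hidx) (by simp [hmx_mem])
      | some j => exact ⟨j, rfl⟩
    obtain ⟨hi0lt, hi0val, hi0first⟩ := PySem.List.getElem_of_index?_eq_some hi0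
    have hi0l : i0 < l.length := by simpa using hi0lt
    have hival : (l[i0]).2 = mx := by
      have := hi0val
      rwa [List.getElem_map] at this
    obtain ⟨i, hilt, hmaxi, hstrict, heq⟩ := pvI_selection l hl
    have himax : ∀ j (hj : j < l.length), (l[j]).2 ≤ mx := by
      intro j hj
      have := PySem.List.max?_isMax hmx (l[j].2) (List.mem_map.mpr ⟨l[j], List.getElem_mem hj, rfl⟩)
      simpa using this
    have hieq : i = i0 := by
      have h1 : (l[i]).2 = mx := le_antisymm (himax i hilt) (hival ▸ hmaxi i0 hi0l)
      rcases Nat.lt_trichotomy i i0 with hc | hc | hc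
      · exact absurd (by rw [List.getElem_map]; exact h1) (hi0first i hc)
      · exact hc
      · exact absurd (hival ▸ hstrict i0 hc) (by omega)
    subst hieq
    have hget_key : PySem.List.pyGet? d.keys (i : Int) = some ((l[i]).1) := by
      rw [hkeys, PySem.List.pyGet?_natCast]
      simp [hi0l]
    have hgetd : d.get? ((l[i]).1) = some ((l[i]).2) :=
      PySem.Dict.get?_of_mem_items d (by rw [Prod.mk.eta]; exact List.getElem_mem hi0l) hnd
    have herase : (d.erase ((l[i]).1)).items = l.eraseIdx i :=
      filter_ne_eq_eraseIdx l i hi0l (by rw [← hkeys]; exact hnd)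
    have hfresh : acc.contains ((l[i]).1) = false :=
      hdisj _ (by rw [hkeys]; exact List.mem_map.mpr ⟨l[i], List.getElem_mem hi0l, rfl⟩)
    have hacc' : (acc.insert ((l[i]).1) ((l[i]).2)).items = acc.items ++ [l[i]] := by
      have := PySem.Dict.items_foldl_insert_fresh [l[i]] Prod.fst Prod.snd acc
        (by intro a ha; simp at ha; subst ha; exact hfresh) (by simp)
      simpa using this
    rw [pvALoop]
    simp only [hvals, hmx, hi0, hget_key, hgetd]
    by_cases hz : (d.erase ((l[i]).1)).size = 0
    · rw [if_pos hz]
      have hz' : l.eraseIdx i = [] := by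
        have : (d.erase ((l[i]).1)).items.length = 0 := hz
        rw [herase] at this
        exact List.length_eq_zero_iff.mp this
      rw [hacc', heq, hz']
      simp [pvI]
    · rw [if_neg hz]
      have hne' : (d.erase ((l[i]).1)).items ≠ [] := by
        intro h
        exact hz (by rw [PySem.Dict.size, h]; rfl)
      have hnd' : (d.erase ((l[i]).1)).keys.Nodup := by
        show ((d.erase ((l[i]).1)).items.map Prod.fst).Nodup
        rw [herase]
        exact ((List.eraseIdx_sublist l i).map Prod.fst).nodup (hkeys ▸ hnd)
      have hdisj' : ∀ c ∈ (d.erase ((l[i]).1)).keys, (acc.insert ((l[i]).1) ((l[i]).2)).contains c = false := by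
        intro c hc
        have hc' : c ∈ (l.eraseIdx i).map Prod.fst := by
          have hc2 : c ∈ (d.erase ((l[i]).1)).items.map Prod.fst := hc
          rwa [herase] at hc2
        have hcmem : c ∈ l.map Prod.fst :=
          ((List.eraseIdx_sublist l i).map Prod.fst).mem hc'
        have hcne : c ≠ (l[i]).1 := by
          intro he
          rw [he] at hc'
          have hmem : (l[i]).1 ∈ (l.map Prod.fst).eraseIdx i := by
            rwa [List.eraseIdx_map]
          exact not_mem_eraseIdx_self (l.map Prod.fst) i (by simpa using hi0l)
            (hkeys ▸ hnd) (by rw [List.getElem_map]; exact hmem)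
        rw [PySem.Dict.contains_insert]
        simp [hcne, hdisj c (by rw [hkeys]; exact hcmem)]
      have := ih (d.erase ((l[i]).1)) (acc.insert ((l[i]).1) ((l[i]).2)) hnd' hdisj' (Or.inl hne')
      rw [this, herase, hacc', heq]
      simp

-- ===== VERDICT (by name: the statement is the Claim_ definition above) =====
theorem get_best_n_composite_cluster_sizes_spec : Claim_equal_get_best_n_composite_cluster_sizes := by
  intro mc n _ hpre
  obtain ⟨h1, hnd⟩ := hpre
  have hemp : (PySem.Dict.empty : PySem.Dict String Int).items = [] := rfl
  have hA := pvALoop_items n.toNat (PySem.Dict.mk mc) PySem.Dict.empty hnd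
    (by intro c _; exact PySem.Dict.contains_empty c)
    (by
      rcases h1 with h | h
      · exact Or.inl h
      · exact Or.inr (Int.toNat_eq_zero.mpr h))
  have hslice : PySem.List.slice (pvI mc) none (some (max n 0)) = (pvI mc).take n.toNat := by
    rw [PySem.List.slice_to (xs := pvI mc) (b := max n 0) (by omega)]
    congr 1
    omega
  have hndk : (((pvI mc).take n.toNat).map Prod.fst).Nodup := by
    rw [List.map_take]
    apply (List.take_sublist _ _).nodup
    have hperm : (pvI mc).Perm mc := by
      rw [← sorted_eq_pvI]
      exact PySem.List.sorted_perm mc _ true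
    exact ((hperm.map Prod.fst).nodup_iff).mpr hnd
  have hfold := PySem.Dict.items_foldl_insert_fresh ((pvI mc).take n.toNat) Prod.fst Prod.snd
    PySem.Dict.empty (by intro a _; exact PySem.Dict.contains_empty _) hndk
  have hB : get_best_n_composite_cluster_sizes_alt mc n = (pvI mc).take n.toNat := by
    simp only [get_best_n_composite_cluster_sizes_alt]
    rw [sorted_eq_pvI, hslice]
    simpa using hfold
  have hA' : get_best_n_composite_cluster_sizes mc n = (pvI mc).take n.toNat := by
    unfold get_best_n_composite_cluster_sizes
    rw [hA, hemp, List.nil_append]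
  unfold Spec_get_best_n_composite_cluster_sizes
  rw [hA', hB]
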